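-- pv_equiv track=rewrite | github.com/mnuman/advent-of-code | 2023/solutions/day03.py | offsets
-- ===== SOURCE A (Python) =====
-- from typing import Tuple
--
-- def offsets(
--         line_number: int,
--         start_col: int,
--         end_col: int,
--         max_lines: int,
--         max_cols: int) -> list[Tuple[int, int]]:
--     return [
--         (line, col)
--         for line in range(line_number - 1, line_number + 2)
--         for col in range(start_col - 1, end_col + 2)
--         if 0 <= line < max_lines and
--         0 <= col < max_cols and
--         (line != line_number or
--          (line == line_number and col < start_col or col > end_col))
--         ]
-- ===== SOURCE B (Python) =====
-- def offsets(line_number, start_col, end_col, max_lines, max_cols):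
--     # Build the perimeter of the span row by row, instead of filtering a full rectangle.
--     lo, hi = start_col - 1, end_col + 1
--     full = range(lo, hi + 1)
--     # the flanking cells of the center row (collapse to one cell / nothing on degenerate spans)
--     sides = [lo] if lo == hi else ([lo, hi] if lo < hi else [])
--     result = []
--     for row, cols in ((line_number - 1, full), (line_number, sides), (line_number + 1, full)):
--         if 0 <= row < max_lines:
--             result.extend((row, c) for c in cols if 0 <= c < max_cols)
--     return result
-- ===== Notes on version B (the rewrite author's own statement) =====
-- stated objective: alternative
-- what changed: Instead of scanning the full 3-row rectangle and filtering every cell with the span-exclusion predicate, B builds the perimeter row by row: a hoisted row-bound check skips whole rows, the top and bottom rows take the plain column range, and the center row contributes only its (deduplicated) two flanking cells in O(1).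
import Mathlib
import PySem

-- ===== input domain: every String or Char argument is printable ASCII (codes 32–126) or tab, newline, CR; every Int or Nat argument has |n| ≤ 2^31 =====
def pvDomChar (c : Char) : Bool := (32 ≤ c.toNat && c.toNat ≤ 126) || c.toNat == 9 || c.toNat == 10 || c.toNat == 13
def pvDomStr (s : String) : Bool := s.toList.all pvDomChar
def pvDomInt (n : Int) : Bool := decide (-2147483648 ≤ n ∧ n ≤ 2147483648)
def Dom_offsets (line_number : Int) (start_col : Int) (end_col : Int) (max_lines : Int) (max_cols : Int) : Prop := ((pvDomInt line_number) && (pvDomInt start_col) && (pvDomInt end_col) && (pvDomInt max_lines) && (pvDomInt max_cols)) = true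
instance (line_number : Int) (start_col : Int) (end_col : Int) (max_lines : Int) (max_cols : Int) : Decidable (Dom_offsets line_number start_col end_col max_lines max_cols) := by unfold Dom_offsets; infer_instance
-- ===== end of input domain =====

-- B builds the perimeter row by row (hoisted row check, O(1) center row) instead of
-- filtering the full 3×(width+2) rectangle; objective: alternative decomposition.

-- ===== PORT A =====
def offsets (line_number : Int) (start_col : Int) (end_col : Int) (max_lines : Int) (max_cols : Int) : List (Int × Int) :=
  (PySem.List.pyRange (line_number - 1) (line_number + 2) 1).flatMap (fun line =>
    (PySem.List.pyRange (start_col - 1) (end_col + 2) 1).filterMap (fun col =>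
      if (0 ≤ line ∧ line < max_lines) ∧ (0 ≤ col ∧ col < max_cols) ∧
          (¬ line = line_number ∨ ((line = line_number ∧ col < start_col) ∨ end_col < col))
      then some (line, col) else none))

-- ===== PORT B =====
def offsets_alt (line_number : Int) (start_col : Int) (end_col : Int) (max_lines : Int) (max_cols : Int) : List (Int × Int) :=
  let lo := start_col - 1
  let hi := end_col + 1
  let full := PySem.List.pyRange lo (hi + 1) 1
  let sides := if lo = hi then [lo] else if lo < hi then [lo, hi] else []
  ([(line_number - 1, full), (line_number, sides), (line_number + 1, full)]).foldl
    (fun result rc =>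
      if 0 ≤ rc.1 ∧ rc.1 < max_lines then
        result ++ rc.2.filterMap (fun c => if 0 ≤ c ∧ c < max_cols then some (rc.1, c) else none)
      else result) []

-- ===== PRECONDITION & SPEC =====
def Spec_offsets (line_number : Int) (start_col : Int) (end_col : Int) (max_lines : Int) (max_cols : Int) (out : List (Int × Int)) : Prop := out = offsets_alt line_number start_col end_col max_lines max_cols
instance (line_number : Int) (start_col : Int) (end_col : Int) (max_lines : Int) (max_cols : Int) (out : List (Int × Int)) : Decidable (Spec_offsets line_number start_col end_col max_lines max_cols out) := by unfold Spec_offsets; infer_instance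

-- ===== CLAIM (what is proved, stated in full; the proofs are below) =====
def Claim_equal_offsets : Prop := ∀ (line_number : Int) (start_col : Int) (end_col : Int) (max_lines : Int) (max_cols : Int), Dom_offsets line_number start_col end_col max_lines max_cols → Spec_offsets line_number start_col end_col max_lines max_cols (offsets line_number start_col end_col max_lines max_cols)

-- ===== LEMMAS AND PROOFS =====

-- A's inner pass for a row that is NOT the span's own row: the span-exclusion
-- disjunct is vacuously true, so it is just the bound filter over the full range.
theorem row_ne (l s e ml mc line : Int) (hne : line ≠ l) :
    (PySem.List.pyRange (s - 1) (e + 2) 1).filterMap (fun col =>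
      if (0 ≤ line ∧ line < ml) ∧ (0 ≤ col ∧ col < mc) ∧
          (¬ line = l ∨ ((line = l ∧ col < s) ∨ e < col))
      then some (line, col) else none) =
    (if 0 ≤ line ∧ line < ml then
      (PySem.List.pyRange (s - 1) (e + 2) 1).filterMap
        (fun c => if 0 ≤ c ∧ c < mc then some (line, c) else none)
     else []) := by
  split
  · next hb =>
    apply List.filterMap_congr
    intro c _
    simp [hne, hb]
  · next hb =>
    rw [List.filterMap_eq_nil_iff.mpr]
    intro c _
    simp only [ite_eq_right_iff]
    rintro ⟨h1, _, _⟩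
    exact absurd h1 hb

-- One surviving flank cell of the center row: the span-exclusion disjunct holds, so
-- A's filter on it coincides with B's plain bound filter.
theorem cell (l s e ml mc c : Int) (hb : 0 ≤ l ∧ l < ml) (hside : c < s ∨ e < c) :
    List.filterMap (fun col =>
      if (0 ≤ l ∧ l < ml) ∧ (0 ≤ col ∧ col < mc) ∧
          (¬ l = l ∨ ((l = l ∧ col < s) ∨ e < col))
      then some (l, col) else none) [c] =
    List.filterMap (fun c => if 0 ≤ c ∧ c < mc then some (l, c) else none) [c] := by
  simp only [List.filterMap_cons, List.filterMap_nil]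
  by_cases h : 0 ≤ c ∧ c < mc
  · rw [if_pos ⟨hb, h, Or.inr (by
      rcases hside with h' | h'
      · exact Or.inl ⟨by trivial, h'⟩
      · exact Or.inr h')⟩, if_pos h]
  · rw [if_neg (fun hh => h hh.2.1), if_neg h]

-- A's inner pass for the span's own row: only the two flanking cells survive.
theorem row_center (l s e ml mc : Int) :
    (PySem.List.pyRange (s - 1) (e + 2) 1).filterMap (fun col =>
      if (0 ≤ l ∧ l < ml) ∧ (0 ≤ col ∧ col < mc) ∧
          (¬ l = l ∨ ((l = l ∧ col < s) ∨ e < col))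
      then some (l, col) else none) =
    (if 0 ≤ l ∧ l < ml then
      (if s - 1 = e + 1 then [s - 1] else if s - 1 < e + 1 then [s - 1, e + 1] else []).filterMap
        (fun c => if 0 ≤ c ∧ c < mc then some (l, c) else none)
     else []) := by
  split
  · next hb =>
    rcases lt_trichotomy (s - 1) (e + 1) with hlt | heq | hgt
    · -- real span: range = [lo] ++ middle ++ [hi], middle filtered out
      have hmid : (PySem.List.pyRange (s - 1 + 1) (e + 1) 1).filterMap (fun col =>
          if (0 ≤ l ∧ l < ml) ∧ (0 ≤ col ∧ col < mc) ∧
              (¬ l = l ∨ ((l = l ∧ col < s) ∨ e < col))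
          then some (l, col) else none) = [] := by
        rw [List.filterMap_eq_nil_iff.mpr]
        intro c hc
        rw [PySem.List.mem_pyRange_one] at hc
        simp only [ite_eq_right_iff]
        rintro ⟨_, _, h3 | ⟨⟨_, h4⟩, _⟩ | h5⟩
        · exact absurd trivial h3
        · omega
        · omega
      rw [if_neg (by omega), if_pos hlt,
          show e + 2 = (e + 1) + 1 by omega,
          PySem.List.pyRange_one_cons (by omega),
          PySem.List.pyRange_one_succ_right (by omega),
          show ((s - 1) :: (PySem.List.pyRange (s - 1 + 1) (e + 1) 1 ++ [e + 1])) =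
            [s - 1] ++ (PySem.List.pyRange (s - 1 + 1) (e + 1) 1 ++ [e + 1]) from rfl,
          List.filterMap_append, List.filterMap_append, hmid, List.nil_append,
          show ([s - 1, e + 1] : List Int) = [s - 1] ++ [e + 1] from rfl,
          List.filterMap_append,
          cell l s e ml mc (s - 1) hb (Or.inl (by omega)),
          cell l s e ml mc (e + 1) hb (Or.inr (by omega))]
    · rw [if_pos heq, show e + 2 = (s - 1) + 1 by omega, PySem.List.pyRange_one_singleton,
          cell l s e ml mc (s - 1) hb (Or.inl (by omega))]
    · rw [if_neg (by omega), if_neg (by omega),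
          PySem.List.pyRange_one_eq_nil (by omega)]
      simp
  · next hb =>
    rw [List.filterMap_eq_nil_iff.mpr]
    intro c _
    simp only [ite_eq_right_iff]
    rintro ⟨h1, _, _⟩
    exact absurd h1 hb

-- ===== VERDICT (by name: the statement is the Claim_ definition above) =====
theorem offsets_spec : Claim_equal_offsets := by
  intro l s e ml mc _
  show offsets l s e ml mc = offsets_alt l s e ml mc
  unfold offsets offsets_alt
  rw [PySem.List.pyRange_one_cons (by omega : l - 1 < l + 2),
      PySem.List.pyRange_one_cons (by omega : l - 1 + 1 < l + 2),
      PySem.List.pyRange_one_cons (by omega : l - 1 + 1 + 1 < l + 2),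
      PySem.List.pyRange_one_eq_nil (by omega : l + 2 ≤ l - 1 + 1 + 1 + 1)]
  simp only [List.flatMap_cons, List.flatMap_nil, List.append_nil, List.foldl_cons, List.foldl_nil]
  rw [show l - 1 + 1 = l by omega]
  rw [row_ne l s e ml mc (l - 1) (by omega), row_center l s e ml mc,
      row_ne l s e ml mc (l + 1) (by omega)]
  rw [show e + 1 + 1 = e + 2 by omega]
  split_ifs <;> simp
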